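-- pv_equiv track=rewrite | github.com/derekli-NJ/15-112-Coursework | week2/hw2.py | containsOddDigits
-- ===== SOURCE A (Python) =====
-- def numberLength(x):
--     n = 0
--     while x>0:
--         x=(x//10)
--         n+=1
--     return n
--
-- def getKthDigit(n, k):
--     kDigit = (abs(n)//(10**k))%10
--     return kDigit
--
-- def containsOddDigits(x):
--     x = abs(x)
--     numLength = numberLength(x)
--     for i in range(numLength):
--         digitValue = getKthDigit(x,i)
--         if digitValue%2==1:
--             return True
--     return False
-- ===== SOURCE B (Python) =====
-- def containsOddDigits(x):
--     return any(c in '13579' for c in str(abs(x)))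
-- ===== Notes on version B (the rewrite author's own statement) =====
-- stated objective: idiomatic
-- what changed: B drops the numberLength/getKthDigit arithmetic (10**k division and modulo per index) and instead scans the decimal string str(abs(x)) once for an odd digit character with any().
import Mathlib
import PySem

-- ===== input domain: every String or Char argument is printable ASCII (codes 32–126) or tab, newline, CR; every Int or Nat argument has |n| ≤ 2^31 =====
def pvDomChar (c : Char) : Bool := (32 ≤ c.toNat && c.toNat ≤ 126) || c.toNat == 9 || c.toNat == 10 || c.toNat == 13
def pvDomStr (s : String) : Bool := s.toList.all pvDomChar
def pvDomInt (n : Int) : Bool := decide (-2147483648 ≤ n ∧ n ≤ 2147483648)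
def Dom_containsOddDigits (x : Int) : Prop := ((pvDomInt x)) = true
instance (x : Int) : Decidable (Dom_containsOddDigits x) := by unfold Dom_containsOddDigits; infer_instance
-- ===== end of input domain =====

-- B replaces the arithmetic digit extraction (numberLength + (x // 10**k) % 10) by a
-- single scan of str(abs(x)) for an odd digit character (idiomatic; not claimed faster).


-- ===== PORT A =====
-- while x > 0: x = x // 10; n += 1
def numberLength (x : Int) : Int :=
  if h : x > 0 then numberLength (PySem.Int.floordiv x 10) + 1 else 0
termination_by x.toNat
decreasing_by
  rw [PySem.Int.floordiv_eq_ediv_of_pos (by omega)]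
  omega

-- kDigit = (abs(n) // (10**k)) % 10 ; A only calls this with k ≥ 0 (a range index),
-- where 10 ^ k.toNat is exactly Python's 10**k (negative k would be a float in Python).
def getKthDigit (n k : Int) : Int :=
  PySem.Int.mod (PySem.Int.floordiv |n| ((10 : Int) ^ k.toNat)) 10

-- the 'for i in range(numLength): if …: return True' loop, early return and all
def codLoop (x : Int) : List Int → Bool
  | [] => false
  | i :: rest => if PySem.Int.mod (getKthDigit x i) 2 == 1 then true else codLoop x rest

def containsOddDigits (x : Int) : Bool :=
  let a := |x|
  codLoop a (PySem.List.pyRange 0 (numberLength a))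

-- ===== PORT B =====
-- any(c in '13579' for c in str(abs(x)))
def containsOddDigits_alt (x : Int) : Bool :=
  (PySem.Int.toStr |x|).toList.any (fun c => ['1', '3', '5', '7', '9'].contains c)

-- ===== PRECONDITION & SPEC =====
def Spec_containsOddDigits (x : Int) (out : Bool) : Prop := out = containsOddDigits_alt x
instance (x : Int) (out : Bool) : Decidable (Spec_containsOddDigits x out) := by unfold Spec_containsOddDigits; infer_instance

-- ===== CLAIM (what is proved, stated in full; the proofs are below) =====
def Claim_equal_containsOddDigits : Prop := ∀ (x : Int), Dom_containsOddDigits x → Spec_containsOddDigits x (containsOddDigits x)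

-- ===== LEMMAS AND PROOFS =====

-- reference predicate: some decimal digit of n is odd (gOdd 0 checks only digit '0')
def gOdd (n : Nat) : Bool :=
  decide (n % 10 % 2 = 1) || (if h : n / 10 = 0 then false else gOdd (n / 10))
termination_by n
decreasing_by exact Nat.div_lt_self (by omega) (by omega)

def pOdd (c : Char) : Bool := ['1', '3', '5', '7', '9'].contains c

def numLen (n : Nat) : Nat :=
  if h : n = 0 then 0 else numLen (n / 10) + 1
termination_by n
decreasing_by exact Nat.div_lt_self (by omega) (by omega)

lemma numberLength_natCast (m : Nat) : numberLength (m : Int) = (numLen m : Int) := by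
  induction m using Nat.strong_induction_on with
  | _ m ih =>
    rw [numberLength, numLen]
    by_cases h : m = 0
    · simp [h]
    · have hpos : (m : Int) > 0 := by omega
      have h10 : PySem.Int.floordiv (m : Int) 10 = ((m / 10 : Nat) : Int) :=
        PySem.Int.floordiv_natCast m 10
      simp only [hpos, dif_pos, h, dif_neg, not_false_iff, h10,
        ih (m / 10) (Nat.div_lt_self (by omega) (by omega))]
      push_cast; ring

lemma getKthDigit_shift (m j : Nat) :
    getKthDigit (m : Int) ((j + 1 : Nat) : Int) = getKthDigit ((m / 10 : Nat) : Int) (j : Int) := by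
  unfold getKthDigit
  have h1 : |(m : Int)| = (m : Int) := abs_of_nonneg (Int.natCast_nonneg _)
  have h2 : |((m / 10 : Nat) : Int)| = ((m / 10 : Nat) : Int) := abs_of_nonneg (Int.natCast_nonneg _)
  rw [h1, h2]
  have e1 : ((10 : Int) ^ (((j + 1 : Nat) : Int)).toNat) = (((10 ^ (j + 1) : Nat)) : Int) := by
    push_cast; simp
  have e2 : ((10 : Int) ^ ((j : Int)).toNat) = (((10 ^ j : Nat)) : Int) := by
    push_cast; simp
  rw [e1, e2, PySem.Int.floordiv_natCast, PySem.Int.floordiv_natCast]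
  congr 2
  rw [Nat.div_div_eq_div_mul, pow_succ, mul_comm]

lemma codLoop_shift (m : Nat) (js : List Nat) :
    codLoop (m : Int) (js.map (fun (j : Nat) => ((j + 1 : Nat) : Int)))
      = codLoop ((m / 10 : Nat) : Int) (js.map (fun (j : Nat) => (j : Int))) := by
  induction js with
  | nil => rfl
  | cons j rest ih =>
    rw [List.map_cons, List.map_cons, codLoop, codLoop, getKthDigit_shift, ih]

lemma codLoop_eq_gOdd (m : Nat) :
    codLoop (m : Int) ((List.range (numLen m)).map (fun (k : Nat) => (k : Int))) = gOdd m := by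
  induction m using Nat.strong_induction_on with
  | _ m ih =>
    rw [numLen, gOdd]
    by_cases h : m = 0
    · simp [h, codLoop]
    · simp only [h, dif_neg, not_false_iff]
      rw [List.range_succ_eq_map, List.map_cons, codLoop]
      have hd0 : getKthDigit (m : Int) (((0 : Nat) : Int)) = ((m % 10 : Nat) : Int) := by
        unfold getKthDigit
        rw [abs_of_nonneg (Int.natCast_nonneg m)]
        simp only [Int.toNat_natCast, pow_zero]
        rw [show (1 : Int) = ((1 : Nat) : Int) from rfl, PySem.Int.floordiv_natCast]
        rw [show (10 : Int) = ((10 : Nat) : Int) from rfl, PySem.Int.mod_natCast]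
        simp
      have htail : codLoop (m : Int)
          (((List.range (numLen (m / 10))).map Nat.succ).map (fun (k : Nat) => (k : Int)))
          = gOdd (m / 10) := by
        rw [List.map_map]
        have hcomp : ((fun (k : Nat) => (k : Int)) ∘ Nat.succ)
            = (fun (j : Nat) => ((j + 1 : Nat) : Int)) := by
          funext j; simp [Nat.succ_eq_add_one]
        rw [hcomp, codLoop_shift m (List.range (numLen (m / 10)))]
        exact ih (m / 10) (Nat.div_lt_self (by omega) (by omega))
      rw [hd0]
      have hm2 : PySem.Int.mod ((m % 10 : Nat) : Int) 2 = ((m % 10 % 2 : Nat) : Int) := by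
        rw [show (2 : Int) = ((2 : Nat) : Int) from rfl, PySem.Int.mod_natCast]
      rw [hm2]
      by_cases hodd : m % 10 % 2 = 1
      · simp [hodd]
      · have hne : ¬ (((m % 10 % 2 : Nat) : Int) == ((1 : Int))) = true := by
          simp; omega
        simp only [hodd, decide_false, Bool.false_or, if_neg hne]
        by_cases hq : m / 10 = 0
        · rw [dif_pos hq, hq]
          rw [numLen]
          simp [codLoop]
        · rw [dif_neg hq]
          exact htail

lemma containsOddDigits_eq_gOdd (x : Int) : containsOddDigits x = gOdd x.natAbs := by
  show codLoop |x| (PySem.List.pyRange 0 (numberLength |x|)) = gOdd x.natAbs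
  rw [Int.abs_eq_natAbs, numberLength_natCast, PySem.List.pyRange_zero_natCast]
  exact codLoop_eq_gOdd x.natAbs

lemma pOdd_digitChar (d : Nat) (hd : d < 10) :
    pOdd (Nat.digitChar d) = decide (d % 2 = 1) := by
  interval_cases d <;> decide

lemma toDigitsCore_any (fuel : Nat) :
    ∀ (n : Nat) (l : List Char), n < fuel →
      (Nat.toDigitsCore 10 fuel n l).any pOdd = (gOdd n || l.any pOdd) := by
  induction fuel with
  | zero => intro n l h; omega
  | succ f ih =>
    intro n l h
    rw [Nat.toDigitsCore, gOdd]
    by_cases hq : n / 10 = 0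
    · simp only [hq, if_pos, dif_pos, List.any_cons,
        pOdd_digitChar (n % 10) (Nat.mod_lt _ (by omega)), Bool.or_false]
    · have hn10 : 10 ≤ n := by
        by_contra hc
        exact hq (Nat.div_eq_of_lt (by omega))
      have hlt : n / 10 < f := by
        have := Nat.div_lt_self (n := n) (by omega) (by omega : (1:Nat) < 10)
        omega
      simp only [hq, if_neg, dif_neg, not_false_iff, ih (n / 10) _ hlt, List.any_cons,
        pOdd_digitChar (n % 10) (Nat.mod_lt _ (by omega))]
      cases gOdd (n / 10) <;> cases l.any pOdd <;> cases (decide (n % 10 % 2 = 1)) <;> rfl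

lemma alt_eq_gOdd (x : Int) : containsOddDigits_alt x = gOdd x.natAbs := by
  unfold containsOddDigits_alt
  rw [Int.abs_eq_natAbs, PySem.Int.toStr]
  have hneg : ¬ ((x.natAbs : Int) < 0) := by omega
  rw [String.toList_ofList, PySem.Int.toChars, if_neg hneg, Int.toNat_natCast, Nat.toDigits]
  show (Nat.toDigitsCore 10 (x.natAbs + 1) x.natAbs []).any pOdd = gOdd x.natAbs
  simpa using toDigitsCore_any (x.natAbs + 1) x.natAbs [] (by omega)

-- ===== VERDICT (by name: the statement is the Claim_ definition above) =====
theorem containsOddDigits_spec : Claim_equal_containsOddDigits := by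
  intro x _
  unfold Spec_containsOddDigits
  rw [containsOddDigits_eq_gOdd, alt_eq_gOdd]
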